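-- pv_equiv track=rewrite | github.com/ChunBoo/JustUK | 282-lineSweepingForMostFrequenctNumber.py | mostFrequencyNumber
-- ===== SOURCE A (Python) =====
-- from collections import defaultdict
--
-- def mostFrequencyNumber(intervals):
--     d=defaultdict(int)
--
--     for i in intervals:
--         d[i[0]]+=1
--         d[i[1]+1]-=1
--
--     c=most=0
--     ans=0
--     for i in sorted(d.keys()):
--         c+=d[i]
--         if c>most:
--             most=c
--             ans=i
--     return ans
-- ===== SOURCE B (Python) =====
-- from bisect import bisect_right
--
-- def mostFrequencyNumber(intervals):
--     # Coverage at x counted directly: (#starts <= x) - (#stops <= x), via two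
--     # sorted arrays and binary search; no difference-map dictionary, no running sum.
--     starts = sorted(i[0] for i in intervals)
--     stops = sorted(i[1] + 1 for i in intervals)
--     best = 0
--     ans = 0
--     for x in sorted(set(starts + stops)):
--         c = bisect_right(starts, x) - bisect_right(stops, x)
--         if c > best:
--             best = c
--             ans = x
--     return ans
-- ===== Notes on version B (the rewrite author's own statement) =====
-- stated objective: alternative
-- what changed: Replaces A's signed difference-map dictionary and running prefix sum with two independently sorted start/stop arrays, computing the coverage at each distinct coordinate directly by two binary searches (bisect_right).
import Mathlib
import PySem

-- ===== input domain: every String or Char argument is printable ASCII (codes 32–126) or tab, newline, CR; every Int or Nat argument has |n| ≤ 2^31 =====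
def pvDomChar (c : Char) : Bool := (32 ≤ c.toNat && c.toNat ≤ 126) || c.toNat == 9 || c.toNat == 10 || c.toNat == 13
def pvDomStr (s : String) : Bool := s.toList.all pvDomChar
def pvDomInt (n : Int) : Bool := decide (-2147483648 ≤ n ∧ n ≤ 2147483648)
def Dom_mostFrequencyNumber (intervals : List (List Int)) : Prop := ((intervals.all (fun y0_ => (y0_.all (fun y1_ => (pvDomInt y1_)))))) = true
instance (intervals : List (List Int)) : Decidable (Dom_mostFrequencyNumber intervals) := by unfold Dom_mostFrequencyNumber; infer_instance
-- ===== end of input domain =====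

-- B computes the coverage at each distinct coordinate directly from two sorted
-- start/stop arrays via binary searches, instead of A's difference-map
-- dictionary with a running prefix sum (objective: alternative algorithm).

-- ===== PORT A =====
-- i[0] / i[1] are ported with pyGet?; Pre_ guarantees both indices are in range,
-- so the '.getD 0' default is never the value read on any admitted input.
def mostFrequencyNumber (intervals : List (List Int)) : Int :=
  let d : PySem.Dict Int Int := intervals.foldl (fun d i =>
      let d := d.modify ((PySem.List.pyGet? i 0).getD 0) 0 (· + 1)
      d.modify ((PySem.List.pyGet? i 1).getD 0 + 1) 0 (· - 1)) PySem.Dict.empty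
  let st := (PySem.List.sorted d.keys (fun x => x)).foldl
      (fun (s : Int × Int × Int) k =>
        let c := s.1 + d.getD k 0
        if c > s.2.1 then (c, c, k) else (c, s.2.1, s.2.2)) (0, 0, 0)
  st.2.2

-- ===== PORT B =====
def mostFrequencyNumber_alt (intervals : List (List Int)) : Int :=
  let starts := PySem.List.sorted (intervals.map (fun i => (PySem.List.pyGet? i 0).getD 0)) (fun x => x)
  let stops := PySem.List.sorted (intervals.map (fun i => (PySem.List.pyGet? i 1).getD 0 + 1)) (fun x => x)
  let st := (PySem.List.sorted (PySem.Set.ofList (starts ++ stops)) (fun x => x)).foldl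
      (fun (s : Int × Int) x =>
        let c := (PySem.List.bisectRight starts x : Int) - (PySem.List.bisectRight stops x : Int)
        if c > s.1 then (c, x) else s) (0, 0)
  st.2

-- ===== PRECONDITION & SPEC =====
-- Pre_ excludes exactly the inputs where A raises IndexError: an interval with
-- fewer than two entries (A reads i[0] and i[1]).
def Pre_mostFrequencyNumber (intervals : List (List Int)) : Prop :=
  ∀ i ∈ intervals, 2 ≤ i.length
instance (intervals : List (List Int)) : Decidable (Pre_mostFrequencyNumber intervals) := by
  unfold Pre_mostFrequencyNumber; infer_instance
def pvWitness_mostFrequencyNumber : List (List Int) := [[1, 3], [2, 5], [4, 2]]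

def Spec_mostFrequencyNumber (intervals : List (List Int)) (out : Int) : Prop := out = mostFrequencyNumber_alt intervals
instance (intervals : List (List Int)) (out : Int) : Decidable (Spec_mostFrequencyNumber intervals out) := by unfold Spec_mostFrequencyNumber; infer_instance

-- ===== CLAIM (what is proved, stated in full; the proofs are below) =====
def Claim_equal_mostFrequencyNumber : Prop := ∀ (intervals : List (List Int)), Dom_mostFrequencyNumber intervals → Pre_mostFrequencyNumber intervals → Spec_mostFrequencyNumber intervals (mostFrequencyNumber intervals)

-- ===== LEMMAS AND PROOFS =====

-- abbreviations used only by the proofs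
def pvStart (i : List Int) : Int := (PySem.List.pyGet? i 0).getD 0
def pvStop (i : List Int) : Int := (PySem.List.pyGet? i 1).getD 0 + 1
def pvD (intervals : List (List Int)) : PySem.Dict Int Int :=
  intervals.foldl (fun d i =>
      let d := d.modify (pvStart i) 0 (· + 1)
      d.modify (pvStop i) 0 (· - 1)) PySem.Dict.empty

-- the dictionary's value at k is (#starts = k) − (#stops = k)
lemma pvD_getD_aux : ∀ (l : List (List Int)) (d : PySem.Dict Int Int) (k : Int),
    (l.foldl (fun d i =>
      let d := d.modify (pvStart i) 0 (· + 1)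
      d.modify (pvStop i) 0 (· - 1)) d).getD k 0
    = d.getD k 0 + ((l.map pvStart).count k : Int) - ((l.map pvStop).count k : Int) := by
  intro l
  induction l with
  | nil => intro d k; simp
  | cons i t ih =>
    intro d k
    simp only [List.foldl_cons, ih, List.map_cons, List.count_cons]
    simp only [PySem.Dict.getD_modify]
    split_ifs <;> simp_all <;> omega

-- k is a key of the dictionary iff it is a start or a stop coordinate
lemma pvD_contains_aux : ∀ (l : List (List Int)) (d : PySem.Dict Int Int) (k : Int),
    (l.foldl (fun d i =>
      let d := d.modify (pvStart i) 0 (· + 1)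
      d.modify (pvStop i) 0 (· - 1)) d).contains k
    = (d.contains k || l.any (fun i => k == pvStart i || k == pvStop i)) := by
  intro l
  induction l with
  | nil => intro d k; simp
  | cons i t ih =>
    intro d k
    simp only [List.foldl_cons, ih, PySem.Dict.contains_modify, List.any_cons]
    cases h1 : (k == pvStart i) <;> cases h2 : (k == pvStop i) <;> simp_all

-- the dictionary's key list has no duplicates
lemma pvD_nodup_aux : ∀ (l : List (List Int)) (d : PySem.Dict Int Int),
    d.keys.Nodup →
    (l.foldl (fun d i =>
      let d := d.modify (pvStart i) 0 (· + 1)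
      d.modify (pvStop i) 0 (· - 1)) d).keys.Nodup := by
  intro l
  induction l with
  | nil => intro d h; simpa
  | cons i t ih =>
    intro d h
    apply ih
    rw [PySem.Dict.keys_modify]
    apply PySem.Dict.nodup_keys_insert
    rw [PySem.Dict.keys_modify]
    exact PySem.Dict.nodup_keys_insert _ _ _ h

-- bisect_right on a sorted list counts the elements ≤ x
lemma bisectRight_eq_countP (xs : List Int) (x : Int)
    (h : xs.Pairwise (· ≤ ·)) :
    (PySem.List.bisectRight xs x : Int) = (xs.countP (fun a => decide (a ≤ x)) : Int) := by
  obtain ⟨hle, hlt, hgt⟩ := PySem.List.bisectRight_spec xs x h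
  set n := PySem.List.bisectRight xs x with hn
  congr 1
  have : xs = xs.take n ++ xs.drop n := (List.take_append_drop n xs).symm
  rw [this, List.countP_append]
  have h1 : (xs.take n).countP (fun a => decide (a ≤ x)) = n := by
    rw [List.countP_eq_length.mpr, List.length_take_of_le hle]
    intro a ha
    obtain ⟨j, hj, rfl⟩ := List.mem_take_iff_getElem.mp ha
    simp only [decide_eq_true_eq]
    exact hlt j (by omega) (by omega)
  have h2 : (xs.drop n).countP (fun a => decide (a ≤ x)) = 0 := by
    rw [List.countP_eq_zero]
    intro a ha
    obtain ⟨j, hj, rfl⟩ := List.mem_drop_iff_getElem.mp (by simpa using ha)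
    simp only [decide_eq_true_eq, not_le]
    exact hgt (n + j) (by omega) (by omega)
  omega

-- sum of pointwise differences
lemma sum_map_sub (l : List Int) (f g : Int → Int) :
    (l.map (fun x => f x - g x)).sum = (l.map f).sum - (l.map g).sum := by
  induction l with
  | nil => simp
  | cons a t ih => simp [ih]; ring

-- sum of indicators of a over a deduplicated filtered list
lemma sum_ind (M : List Int) (y a : Int) (hnd : M.Nodup) :
    ((M.filter (fun k => decide (k ≤ y))).map (fun k => if k = a then (1:Int) else 0)).sum
    = if a ∈ M ∧ a ≤ y then 1 else 0 := by
  have h1 : ((M.filter (fun k => decide (k ≤ y))).map (fun k => if k = a then (1:Int) else 0)).sum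
      = ((M.filter (fun k => decide (k ≤ y))).count a : Int) := by
    rw [show (fun k => if k = a then (1:Int) else 0)
          = (fun k => if ((fun k => k == a) k) = true then (1:Int) else 0) from
        funext (fun k => by by_cases h : k = a <;> simp [h])]
    rw [PySem.List.sum_map_ite_one_zero]
    rfl
  rw [h1]
  by_cases hay : a ≤ y
  · rw [List.count_filter (by simp [hay])]
    by_cases hm : a ∈ M
    · simp [hm, hay, List.count_eq_one_of_mem hnd hm]
    · simp [hm, List.count_eq_zero_of_not_mem hm]
  · have : a ∉ M.filter (fun k => decide (k ≤ y)) := by simp [List.mem_filter, hay]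
    simp [List.count_eq_zero_of_not_mem this, hay]

-- sum of per-key counts over the distinct keys ≤ y equals the direct countP
lemma sum_counts_filter (S : List Int) (M : List Int) (y : Int)
    (hnd : M.Nodup) (hsub : ∀ x ∈ S, x ≤ y → x ∈ M) :
    ((M.filter (fun k => decide (k ≤ y))).map (fun k => (S.count k : Int))).sum =
      (S.countP (fun a => decide (a ≤ y)) : Int) := by
  induction S with
  | nil => simp
  | cons a S' ih =>
    have hfun : (fun k => (((a :: S').count k : Nat) : Int))
        = fun k => ((S'.count k : Nat) : Int) + (if k = a then (1:Int) else 0) := by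
      funext k
      rw [List.count_cons]
      push_cast
      by_cases h : k = a
      · simp [h]
      · simp [h]; omega
    rw [hfun, PySem.List.sum_map_add_int,
        ih (fun x hx hxy => hsub x (List.mem_cons_of_mem _ hx) hxy),
        sum_ind _ _ _ hnd, List.countP_cons]
    have hmem : a ≤ y → a ∈ M := hsub a List.mem_cons_self
    push_cast
    by_cases hay : a ≤ y
    · simp [hay, hmem hay]
    · simp [hay]

-- the main sweep: A's incremental fold equals B's direct-count fold
lemma sweep_eq (w g : Int → Int) :
    ∀ (L : List Int) (c m a : Int),
      (∀ y ∈ L, c + ((L.filter (fun k => decide (k ≤ y))).map w).sum = g y) →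
      L.Pairwise (· < ·) →
      (L.foldl (fun (s : Int × Int × Int) k =>
          let c := s.1 + w k
          if c > s.2.1 then (c, c, k) else (c, s.2.1, s.2.2)) (c, m, a)).2 =
      (L.foldl (fun (s : Int × Int) x =>
          let c := g x
          if c > s.1 then (c, x) else s) (m, a)) := by
  intro L
  induction L with
  | nil => intro c m a _ _; rfl
  | cons x L' ih =>
    intro c m a H hp
    rw [List.pairwise_cons] at hp
    have hx : g x = c + w x := by
      have := H x List.mem_cons_self
      rw [List.filter_cons] at this
      have hf : L'.filter (fun k => decide (k ≤ x)) = [] := by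
        rw [List.filter_eq_nil_iff]
        intro k hk
        simpa using not_le.mpr (hp.1 k hk)
      simp [hf] at this
      omega
    have Hnext : ∀ y ∈ L', (c + w x) + ((L'.filter (fun k => decide (k ≤ y))).map w).sum = g y := by
      intro y hy
      have := H y (List.mem_cons_of_mem _ hy)
      rw [List.filter_cons] at this
      have hxy : x ≤ y := le_of_lt (hp.1 y hy)
      simp only [hxy, decide_true, if_true] at this
      simp at this ⊢
      omega
    simp only [List.foldl_cons, hx]
    by_cases hgt : m < c + w x
    · rw [if_pos hgt, if_pos hgt]
      exact ih _ _ _ Hnext hp.2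
    · rw [if_neg hgt, if_neg hgt]
      exact ih _ _ _ Hnext hp.2

-- the two ports agree on every input (the Pre_/Dom_ hypotheses are not needed
-- for the equality of the ports themselves)
lemma ports_agree (intervals : List (List Int)) :
    mostFrequencyNumber intervals = mostFrequencyNumber_alt intervals := by
  unfold mostFrequencyNumber mostFrequencyNumber_alt
  simp only []
  set S := intervals.map pvStart with hS
  set T := intervals.map pvStop with hT
  have hSdef : intervals.map (fun i => (PySem.List.pyGet? i 0).getD 0) = S := rfl
  have hTdef : intervals.map (fun i => (PySem.List.pyGet? i 1).getD 0 + 1) = T := rfl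
  set d := pvD intervals with hd
  have hddef : intervals.foldl (fun d i =>
      let d := d.modify ((PySem.List.pyGet? i 0).getD 0) 0 (· + 1)
      d.modify ((PySem.List.pyGet? i 1).getD 0 + 1) 0 (· - 1)) PySem.Dict.empty = d := rfl
  rw [hSdef, hTdef, hddef]
  set starts := PySem.List.sorted S (fun x => x) with hstarts
  set stops := PySem.List.sorted T (fun x => x) with hstops
  have hgetD : ∀ k, d.getD k 0 = (S.count k : Int) - (T.count k : Int) := by
    intro k
    rw [hd]
    unfold pvD
    rw [pvD_getD_aux]
    rw [PySem.Dict.getD_empty, hS, hT]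
    ring
  have hmemkeys : ∀ k, k ∈ d.keys ↔ k ∈ S ∨ k ∈ T := by
    intro k
    rw [← PySem.Dict.contains_iff_mem_keys, hd]
    unfold pvD
    rw [pvD_contains_aux]
    simp only [PySem.Dict.contains_empty, Bool.false_or, List.any_eq_true, Bool.or_eq_true,
      beq_iff_eq, hS, hT, List.mem_map]
    constructor
    · rintro ⟨i, hi, h | h⟩
      · exact Or.inl ⟨i, hi, h.symm⟩
      · exact Or.inr ⟨i, hi, h.symm⟩
    · rintro (⟨i, hi, h⟩ | ⟨i, hi, h⟩)
      · exact ⟨i, hi, Or.inl h.symm⟩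
      · exact ⟨i, hi, Or.inr h.symm⟩
  have hnodup : d.keys.Nodup := by
    rw [hd]; unfold pvD
    exact pvD_nodup_aux _ _ (by simp [PySem.Dict.keys_empty])
  set L := PySem.List.sorted d.keys (fun x => x) with hL
  have hLnodup : L.Nodup := ((PySem.List.sorted_perm d.keys _ _).nodup_iff).mpr hnodup
  have hLpairlt : L.Pairwise (· < ·) := by
    have h1 : L.Pairwise (· ≤ ·) := PySem.List.sorted_pairwise d.keys (fun x => x)
    have h2 : L.Pairwise (· ≠ ·) := hLnodup
    exact (h1.and h2).imp (fun h => lt_of_le_of_ne h.1 h.2)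
  have hLmem : ∀ k, k ∈ L ↔ k ∈ S ∨ k ∈ T := by
    intro k
    rw [hL, PySem.List.mem_sorted, hmemkeys]
  have hLB : PySem.List.sorted (PySem.Set.ofList (starts ++ stops)) (fun x => x) = L := by
    apply PySem.List.sorted_eq_of_perm_of_pairwise_lt _ _ _ _ hLpairlt
    rw [List.perm_ext_iff_of_nodup hLnodup (PySem.Set.nodup_ofList _)]
    intro k
    rw [hLmem, PySem.Set.mem_ofList, List.mem_append, hstarts, hstops,
        PySem.List.mem_sorted, PySem.List.mem_sorted]
  rw [hLB]
  have hg : ∀ x, (PySem.List.bisectRight starts x : Int) - (PySem.List.bisectRight stops x : Int)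
      = (S.countP (fun a => decide (a ≤ x)) : Int) - (T.countP (fun a => decide (a ≤ x)) : Int) := by
    intro x
    rw [bisectRight_eq_countP starts x (PySem.List.sorted_pairwise S (fun x => x)),
        bisectRight_eq_countP stops x (PySem.List.sorted_pairwise T (fun x => x))]
    rw [(PySem.List.sorted_perm S (fun x => x) false).countP_eq,
        (PySem.List.sorted_perm T (fun x => x) false).countP_eq]
  have hsweep := sweep_eq (fun k => d.getD k 0)
      (fun x => (PySem.List.bisectRight starts x : Int) - (PySem.List.bisectRight stops x : Int))
      L 0 0 0 ?_ hLpairlt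
  · exact congrArg Prod.snd hsweep
  · intro y hy
    have hmapw : (L.filter (fun k => decide (k ≤ y))).map (fun k => d.getD k 0)
        = (L.filter (fun k => decide (k ≤ y))).map (fun k => (S.count k : Int) - (T.count k : Int)) := by
      apply List.map_congr_left
      intro k _
      exact hgetD k
    rw [zero_add, hmapw, sum_map_sub,
        sum_counts_filter S L y hLnodup (fun x hx _ => (hLmem x).mpr (Or.inl hx)),
        sum_counts_filter T L y hLnodup (fun x hx _ => (hLmem x).mpr (Or.inr hx))]
    exact (hg y).symm

-- ===== VERDICT (by name: the statement is the Claim_ definition above) =====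
theorem mostFrequencyNumber_spec : Claim_equal_mostFrequencyNumber := by
  intro intervals _ _
  exact ports_agree intervals
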